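-- pv_equiv track=rewrite | github.com/galaxyproject/galaxy | lib/galaxy/webapps/community/model/__init__.py | directory_hash_id
-- ===== SOURCE A (Python) =====
-- def directory_hash_id( id ):
--     s = str( id )
--     l = len( s )
--     # Shortcut -- ids 0-999 go under ../000/
--     if l < 4:
--         return [ "000" ]
--     # Pad with zeros until a multiple of three
--     padded = ( ( ( 3 - len( s ) ) % 3 ) * "0" ) + s
--     # Drop the last three digits -- 1000 files per directory
--     padded = padded[:-3]
--     # Break into chunks of three
--     return [ padded[i*3:(i+1)*3] for i in range( len( padded ) // 3 ) ]
-- ===== SOURCE B (Python) =====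
-- def directory_hash_id(id):
--     s = str(id)
--     # Shortcut -- ids 0-999 go under ../000/
--     if len(s) < 4:
--         return ["000"]
--     # Drop the last three digits, then group from the right in steps of three
--     t = s[:-3]
--     chunks = []
--     while len(t) > 3:
--         chunks.append(t[-3:])
--         t = t[:-3]
--     # leftmost remainder, left-padded with zeros to length three
--     chunks.append("0" * (3 - len(t)) + t)
--     chunks.reverse()
--     return chunks
-- ===== Notes on version B (the rewrite author's own statement) =====
-- stated objective: alternative
-- what changed: Instead of left-padding the string to a multiple of three and slicing forward by index, B scans the truncated string from the right taking trailing three-character chunks into an accumulator, left-pads the final leftmost remainder, and reverses the accumulated list.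
import Mathlib
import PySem

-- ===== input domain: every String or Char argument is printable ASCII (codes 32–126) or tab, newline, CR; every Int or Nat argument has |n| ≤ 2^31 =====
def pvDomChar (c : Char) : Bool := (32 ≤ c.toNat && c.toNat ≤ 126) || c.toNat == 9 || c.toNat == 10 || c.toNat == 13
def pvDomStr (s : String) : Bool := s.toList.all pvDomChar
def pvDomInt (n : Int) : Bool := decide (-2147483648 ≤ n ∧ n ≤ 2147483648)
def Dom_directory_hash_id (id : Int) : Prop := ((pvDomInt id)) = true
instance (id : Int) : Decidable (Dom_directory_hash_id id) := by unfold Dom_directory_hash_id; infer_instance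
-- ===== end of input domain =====

-- B groups the id's digit string from the right in steps of three with a reversed accumulator,
-- instead of A's pad-to-a-multiple-of-three plus forward index comprehension; objective: alternative decomposition.

-- ===== PORT A =====
-- literal port of A; strings are handled on the List Char side (PySem.Int.toChars = str(id))
def directory_hash_id (id : Int) : List String :=
  let s := PySem.Int.toChars id
  let l : Int := (s.length : Int)
  -- Shortcut -- ids 0-999 go under ../000/
  if l < 4 then ["000"]
  else
    -- Pad with zeros until a multiple of three
    let padded := List.replicate (PySem.Int.mod (3 - l) 3).toNat '0' ++ s
    -- Drop the last three digits -- 1000 files per directory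
    let padded := PySem.List.slice padded none (some (-3))
    -- Break into chunks of three
    (PySem.List.pyRange 0 (PySem.Int.floordiv (padded.length : Int) 3) 1).map
      (fun i => String.ofList (PySem.List.slice padded (some (i * 3)) (some ((i + 1) * 3))))

-- ===== PORT B =====
-- the while-loop of Source B: take the trailing three chars while more than three remain
-- (t[-3:] = drop (len-3), t[:-3] = take (len-3), exact by PySem.List.slice_from_neg_ofNat / slice_to_neg_ofNat);
-- chunks are appended and the list reversed at the end, as in Source B
def pvBLoop (t : List Char) (chunks : List String) : List String :=
  if 3 < t.length then
    pvBLoop (t.take (t.length - 3)) (chunks ++ [String.ofList (t.drop (t.length - 3))])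
  else
    chunks ++ [String.ofList (List.replicate (3 - t.length) '0' ++ t)]
termination_by t.length
decreasing_by simp [List.length_take]; omega

def directory_hash_id_alt (id : Int) : List String :=
  let s := PySem.Int.toChars id
  if s.length < 4 then ["000"]
  else (pvBLoop (s.take (s.length - 3)) []).reverse

-- ===== PRECONDITION & SPEC =====
def Spec_directory_hash_id (id : Int) (out : List String) : Prop := out = directory_hash_id_alt id
instance (id : Int) (out : List String) : Decidable (Spec_directory_hash_id id out) := by unfold Spec_directory_hash_id; infer_instance

-- ===== CLAIM (what is proved, stated in full; the proofs are below) =====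
def Claim_equal_directory_hash_id : Prop := ∀ (id : Int), Dom_directory_hash_id id → Spec_directory_hash_id id (directory_hash_id id)

-- ===== LEMMAS AND PROOFS =====

-- chunks of three, left to right: common characterisation of both programs' output
def pvChunk3 : List Char → List (List Char)
  | a :: b :: c :: r => [a, b, c] :: pvChunk3 r
  | _ => []

theorem pvChunk3_len3 (w : List Char) (h : w.length = 3) : pvChunk3 w = [w] := by
  match w, h with
  | [a, b, c], _ => rfl

theorem pvChunk3_append3 (u v : List Char) (hu : u.length % 3 = 0) (hv : v.length = 3) :
    pvChunk3 (u ++ v) = pvChunk3 u ++ [v] := by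
  induction u using pvChunk3.induct with
  | case1 a b c r ih =>
      simp only [List.length_cons] at hu
      simp only [List.cons_append, pvChunk3, ih (by omega)]
  | case2 u h2 =>
      match u, hu with
      | [], _ => simpa [pvChunk3] using pvChunk3_len3 v hv
      | a :: b :: c :: r, _ => exact absurd rfl (h2 a b c r)
      | [a], hu' => simp at hu'
      | [a, b], hu' => simp at hu'

-- the index comprehension over a multiple-of-three list, as drop/take, IS pvChunk3
theorem pvRangeChunks (m : Nat) : ∀ (u : List Char), u.length = 3 * m →
    (List.range m).map (fun k => (u.drop (3 * k)).take 3) = pvChunk3 u := by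
  induction m with
  | zero =>
      intro u hu
      have : u = [] := List.eq_nil_of_length_eq_zero (by omega)
      simp [this, pvChunk3]
  | succ m ih =>
      intro u hu
      match u, hu with
      | a :: b :: c :: r, hu =>
        have hr : r.length = 3 * m := by simp at hu; omega
        rw [List.range_succ_eq_map]
        simp only [List.map_cons, List.map_map]
        rw [show pvChunk3 (a :: b :: c :: r) = [a, b, c] :: pvChunk3 r from rfl]
        congr 1
        rw [← ih r hr]
        apply List.map_congr_left
        intro k _
        simp only [Function.comp]
        rw [show 3 * (k + 1) = 3 * k + 1 + 1 + 1 from by ring]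
        simp [List.drop_succ_cons]

-- A's chunk comprehension computes pvChunk3
theorem pvChunksA (u : List Char) (m : Nat) (hu : u.length = 3 * m) :
    (PySem.List.pyRange 0 (PySem.Int.floordiv ((u.length : Int)) 3) 1).map
      (fun i => String.ofList (PySem.List.slice u (some (i * 3)) (some ((i + 1) * 3))))
    = (pvChunk3 u).map String.ofList := by
  have hdiv : PySem.Int.floordiv ((u.length : Int)) 3 = (m : Int) := by
    rw [PySem.Int.floordiv_eq_iff_of_pos (by omega)]; omega
  rw [hdiv, PySem.List.pyRange_one, show ((m : Int) - 0).toNat = m from by omega]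
  rw [← pvRangeChunks m u hu, List.map_map, List.map_map]
  apply List.map_congr_left
  intro k _
  simp only [Function.comp]
  rw [show (0 : Int) + (k : Int) = (k : Int) from by ring]
  congr 1
  rw [show ((k : Int)) * 3 = ((3 * k : Nat) : Int) from by push_cast; ring,
      show ((k : Int) + 1) * 3 = ((3 * k + 3 : Nat) : Int) from by push_cast; ring,
      PySem.List.slice_natCast]
  congr 1
  omega

theorem pvBLoop_accAux (n : Nat) : ∀ (t : List Char), t.length ≤ n → ∀ (acc : List String),
    pvBLoop t acc = acc ++ pvBLoop t [] := by
  induction n with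
  | zero => intro t h acc; rw [pvBLoop, if_neg (by omega), pvBLoop, if_neg (by omega)]; simp
  | succ n ih =>
      intro t h acc
      by_cases h3 : 3 < t.length
      · conv_lhs => rw [pvBLoop, if_pos h3]
        conv_rhs => rw [pvBLoop, if_pos h3]
        rw [ih _ (by simp; omega)]
        simp only [List.nil_append, List.append_assoc]
        congr 1
        rw [ih (t.take (t.length - 3)) (by simp; omega) [String.ofList (t.drop (t.length - 3))]]
      · conv_lhs => rw [pvBLoop, if_neg h3]
        conv_rhs => rw [pvBLoop, if_neg h3]
        simp

theorem pvBLoop_acc (t : List Char) (acc : List String) :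
    pvBLoop t acc = acc ++ pvBLoop t [] := pvBLoop_accAux t.length t le_rfl acc

-- B's loop computes pvChunk3 of the zero-padded input
theorem pvBMain (n : Nat) : ∀ (t : List Char), t.length ≤ n → t ≠ [] →
    (pvBLoop t []).reverse
      = (pvChunk3 (List.replicate ((3 - t.length % 3) % 3) '0' ++ t)).map String.ofList := by
  induction n with
  | zero => intro t h1 h2; interval_cases ht : t.length; simp_all
  | succ n ih =>
      intro t h1 h2
      by_cases h3 : 3 < t.length
      · rw [pvBLoop, if_pos h3, pvBLoop_acc]
        set t' := t.take (t.length - 3) with ht'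
        set d := t.drop (t.length - 3) with hd
        have hlt' : t'.length = t.length - 3 := by simp [ht']
        have hld : d.length = 3 := by simp [hd]; omega
        rw [List.reverse_append]
        simp only [List.nil_append, List.reverse_cons, List.reverse_nil]
        rw [ih t' (by omega) (by intro hnil; rw [hnil] at hlt'; simp at hlt'; omega)]
        have hpeq : (3 - t'.length % 3) % 3 = (3 - t.length % 3) % 3 := by omega
        rw [hpeq]
        have : List.replicate ((3 - t.length % 3) % 3) '0' ++ t
            = (List.replicate ((3 - t.length % 3) % 3) '0' ++ t') ++ d := by
          rw [List.append_assoc, List.take_append_drop]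
        rw [this, pvChunk3_append3 _ d (by simp [hlt']; omega) hld]
        simp
      · rw [pvBLoop, if_neg h3]
        have h1' : 1 ≤ t.length := by cases t; simp_all; simp
        have hp : (3 - t.length % 3) % 3 = 3 - t.length := by omega
        rw [hp, pvChunk3_len3 _ (by simp; omega)]
        simp

-- ===== VERDICT (by name: the statement is the Claim_ definition above) =====
theorem directory_hash_id_spec : Claim_equal_directory_hash_id := by
  intro id _
  unfold Spec_directory_hash_id directory_hash_id directory_hash_id_alt
  simp only []
  set s := PySem.Int.toChars id with hs
  by_cases h4 : s.length < 4
  · simp [h4, show ((s.length : Int) < 4) from by exact_mod_cast h4]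
  · have h4' : ¬ ((s.length : Int) < 4) := by exact_mod_cast h4
    rw [if_neg h4', if_neg h4]
    set l := s.length with hl
    have hl4 : 4 ≤ l := by omega
    set p := (PySem.Int.mod (3 - (l : Int)) 3).toNat with hpdef
    have hpI : (p : Int) = (3 - (l : Int)) % 3 := by
      rw [hpdef, PySem.Int.mod_eq_emod_of_pos (by omega)]; omega
    have hmod3 : (p + l) % 3 = 0 := by omega
    set t := s.take (l - 3) with ht
    have htlen : t.length = l - 3 := by simp [ht]; omega
    have htne : t ≠ [] := by
      intro hnil; rw [hnil] at htlen; simp at htlen; omega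
    -- padded[:-3] = replicate p '0' ++ t
    have hslice : PySem.List.slice (List.replicate p '0' ++ s) none (some (-3))
        = List.replicate p '0' ++ t := by
      rw [PySem.List.slice_to_neg_ofNat _ 3 (by norm_num)]
      have : (List.replicate p '0' ++ s).length - 3 = (List.replicate p '0').length + (l - 3) := by
        simp; omega
      rw [this, List.take_length_add_append]
    rw [hslice]
    obtain ⟨m, hm⟩ : ∃ m, (List.replicate p '0' ++ t).length = 3 * m := by
      refine ⟨(p + (l - 3)) / 3, ?_⟩
      simp [htlen]; omega
    rw [pvChunksA _ m hm, pvBMain t.length t le_rfl htne]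
    congr 3
    rw [htlen]
    congr 1
    omega
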